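-- pv_equiv track=rewrite | github.com/NguyenTrinh3008/ZepAI | app/context_formatters.py | format_categorized
-- ===== SOURCE A (Python) =====
-- from typing import List, Dict, Any, Optional
--
-- def format_categorized(memories: List[Dict[str, Any]]) -> str:
--     """Group conversation memories by type/severity"""
--     if not memories:
--         return "No conversation context available."
--
--     # Group by severity
--     by_severity = {'high': [], 'medium': [], 'low': [], 'other': []}
--     for mem in memories:
--         severity = mem.get('severity', 'other')
--         by_severity[severity].append(mem)
--
--     sections = []
--
--     # High priority first
--     if by_severity['high']:
--         sections.append("**High Priority Changes:**")
--         for mem in by_severity['high']: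
--             text = mem.get('text', mem.get('summary', ''))
--             file = mem.get('file_path', '')
--             if file:
--                 sections.append(f"  • {text} ({file})")
--             else:
--                 sections.append(f"  • {text}")
--
--     # Medium priority
--     if by_severity['medium']:
--         sections.append("\n**Medium Priority Changes:**")
--         for mem in by_severity['medium']:
--             text = mem.get('text', mem.get('summary', ''))
--             file = mem.get('file_path', '')
--             if file:
--                 sections.append(f"  • {text} ({file})")
--             else:
--                 sections.append(f"  • {text}")
--
--     # Low priority
--     if by_severity['low']:
--         sections.append("\n**Low Priority Changes:**")
--         for mem in by_severity['low'][:5]:  # Limit low priority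
--             text = mem.get('text', mem.get('summary', ''))
--             sections.append(f"  • {text}")
--
--     # Other
--     if by_severity['other']:
--         sections.append("\n**Other Context:**")
--         for mem in by_severity['other'][:3]:
--             text = mem.get('text', mem.get('summary', ''))
--             sections.append(f"  • {text}")
--
--     return "\n".join(sections) if sections else "No conversation context available."
-- ===== SOURCE B (Python) =====
-- def format_categorized(memories):
--     """Group conversation memories by type/severity"""
--     if not memories:
--         return "No conversation context available."
--
--     order = {'high': 0, 'medium': 1, 'low': 2, 'other': 3}
--     headers = ["**High Priority Changes:**", "\n**Medium Priority Changes:**",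
--                "\n**Low Priority Changes:**", "\n**Other Context:**"]
--     limits = [None, None, 5, 3]
--
--     # Stable sort brings the severities together in priority order;
--     # one scan then emits a header whenever the severity rank changes.
--     ranked = sorted(memories, key=lambda m: order[m.get('severity', 'other')])
--
--     sections = []
--     prev = -1
--     count = 0
--     for mem in ranked:
--         r = order[mem.get('severity', 'other')]
--         if r != prev:
--             sections.append(headers[r])
--             prev = r
--             count = 0
--         count += 1
--         limit = limits[r]
--         if limit is None or count <= limit:
--             text = mem.get('text', mem.get('summary', ''))
--             file = mem.get('file_path', '') if r <= 1 else ''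
--             if file:
--                 sections.append(f"  • {text} ({file})")
--             else:
--                 sections.append(f"  • {text}")
--     return "\n".join(sections)
-- ===== Notes on version B (the rewrite author's own statement) =====
-- stated objective: alternative
-- what changed: Replaces A's four-bucket dict and four copy-pasted formatting blocks by a stable sort on a severity rank followed by a single scan that emits a section header whenever the rank changes.
-- outside the precondition, e.g. on format_categorized([{'severity': 'urgent'}]): A raises KeyError, B raises KeyError
import Mathlib
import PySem

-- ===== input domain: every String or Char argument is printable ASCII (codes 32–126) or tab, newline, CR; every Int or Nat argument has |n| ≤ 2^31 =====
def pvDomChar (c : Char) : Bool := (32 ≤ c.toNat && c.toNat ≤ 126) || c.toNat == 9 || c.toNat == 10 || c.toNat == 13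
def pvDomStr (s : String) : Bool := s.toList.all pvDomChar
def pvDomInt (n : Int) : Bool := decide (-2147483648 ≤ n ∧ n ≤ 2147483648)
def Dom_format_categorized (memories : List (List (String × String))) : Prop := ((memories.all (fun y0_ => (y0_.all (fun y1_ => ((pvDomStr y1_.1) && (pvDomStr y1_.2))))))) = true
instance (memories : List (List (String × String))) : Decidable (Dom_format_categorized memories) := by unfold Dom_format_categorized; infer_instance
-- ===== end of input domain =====

-- B replaces A's bucket-dict-plus-four-copy-pasted-blocks by a stable sort on a severity
-- rank followed by a single scan that emits a header whenever the rank changes: alternative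
-- decomposition, same cost. Both Pythons raise KeyError on an unknown severity (outside Pre_).

-- ===== PORT A =====
-- mem.get(k, d): first-match association-list lookup (exact for Python dicts)
def fcGet (mem : List (String × String)) (k d : String) : String :=
  (PySem.Dict.mk mem).getD k d

def fcBucketsA (memories : List (List (String × String))) :
    PySem.Dict String (List (List (String × String))) :=
  memories.foldl
    (fun d mem => d.modify (fcGet mem "severity" "other") [] (fun l => l ++ [mem]))
    (PySem.Dict.ofList [("high", []), ("medium", []), ("low", []), ("other", [])])

def fcLineFileA (mem : List (String × String)) : String :=
  let text := fcGet mem "text" (fcGet mem "summary" "")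
  let file := fcGet mem "file_path" ""
  if file ≠ "" then "  • " ++ text ++ " (" ++ file ++ ")" else "  • " ++ text

def fcLineA (mem : List (String × String)) : String :=
  "  • " ++ fcGet mem "text" (fcGet mem "summary" "")

def format_categorized (memories : List (List (String × String))) : String :=
  if memories = [] then "No conversation context available."
  else
    let by_severity := fcBucketsA memories
    let sections : List String := []
    let high := by_severity.getD "high" []
    let sections :=
      if high ≠ [] then
        high.foldl (fun acc mem => acc ++ [fcLineFileA mem])
          (sections ++ ["**High Priority Changes:**"])
      else sections
    let medium := by_severity.getD "medium" []
    let sections :=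
      if medium ≠ [] then
        medium.foldl (fun acc mem => acc ++ [fcLineFileA mem])
          (sections ++ ["\n**Medium Priority Changes:**"])
      else sections
    let low := by_severity.getD "low" []
    let sections :=
      if low ≠ [] then
        (PySem.List.slice low none (some 5)).foldl (fun acc mem => acc ++ [fcLineA mem])
          (sections ++ ["\n**Low Priority Changes:**"])
      else sections
    let other := by_severity.getD "other" []
    let sections :=
      if other ≠ [] then
        (PySem.List.slice other none (some 3)).foldl (fun acc mem => acc ++ [fcLineA mem])
          (sections ++ ["\n**Other Context:**"])
      else sections
    if sections ≠ [] then PySem.Str.join "\n" sections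
    else "No conversation context available."

-- ===== PORT B =====
def fcHeaders : List String :=
  ["**High Priority Changes:**", "\n**Medium Priority Changes:**",
   "\n**Low Priority Changes:**", "\n**Other Context:**"]

def fcLimits : List (Option Int) := [none, none, some 5, some 3]

-- order[m.get('severity','other')]: on an unknown severity Python raises KeyError (outside
-- Pre_), so the default 3 of getD is never reached on any admitted input.
def fcRank (mem : List (String × String)) : Int :=
  (PySem.Dict.ofList
      [("high", (0 : Int)), ("medium", 1), ("low", 2), ("other", 3)]).getD
    (fcGet mem "severity" "other") 3

-- one iteration of B's scan over the sorted list; state = (sections, prev, count)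
def fcStep (st : List String × Int × Int) (mem : List (String × String)) :
    List String × Int × Int :=
  let r := fcRank mem
  let st :=
    if r ≠ st.2.1 then (st.1 ++ [PySem.List.pyGetD fcHeaders r ""], r, (0 : Int)) else st
  let count := st.2.2 + 1
  let limit := PySem.List.pyGetD fcLimits r none
  if limit.all (fun l => decide (count ≤ l)) then
    let text := fcGet mem "text" (fcGet mem "summary" "")
    let file := if r ≤ 1 then fcGet mem "file_path" "" else ""
    if file ≠ "" then (st.1 ++ ["  • " ++ text ++ " (" ++ file ++ ")"], st.2.1, count)
    else (st.1 ++ ["  • " ++ text], st.2.1, count)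
  else (st.1, st.2.1, count)

def format_categorized_alt (memories : List (List (String × String))) : String :=
  if memories = [] then "No conversation context available."
  else
    let ranked := PySem.List.sorted memories fcRank false
    let st := ranked.foldl fcStep ([], -1, 0)
    PySem.Str.join "\n" st.1

-- ===== PRECONDITION & SPEC =====
-- Pre_ excludes inputs with a memory whose 'severity' value is not one of the four bucket
-- keys: there Python A (and Python B alike) raises KeyError and returns no value.
def Pre_format_categorized (memories : List (List (String × String))) : Prop :=
  ∀ mem ∈ memories,
    fcGet mem "severity" "other" ∈ (["high", "medium", "low", "other"] : List String)
instance (memories : List (List (String × String))) : Decidable (Pre_format_categorized memories) := by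
  unfold Pre_format_categorized; infer_instance

def pvWitness_format_categorized : (List (List (String × String))) :=
  [[("severity", "high"), ("text", "refactor"), ("file_path", "a.py")],
   [("summary", "note")]]

def Spec_format_categorized (memories : List (List (String × String))) (out : String) : Prop := out = format_categorized_alt memories
instance (memories : List (List (String × String))) (out : String) : Decidable (Spec_format_categorized memories out) := by unfold Spec_format_categorized; infer_instance

-- ===== CLAIM (what is proved, stated in full; the proofs are below) =====
def Claim_equal_format_categorized : Prop := ∀ (memories : List (List (String × String))), Dom_format_categorized memories → Pre_format_categorized memories → Spec_format_categorized memories (format_categorized memories)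

-- ===== LEMMAS AND PROOFS =====

-- the sub-list of memories of rank r (order preserved)
def fcF (memories : List (List (String × String))) (r : Int) : List (List (String × String)) :=
  memories.filter (fun m => fcRank m == r)

def fcLim (r : Int) : Option Int := PySem.List.pyGetD fcLimits r none

def fcLine (r : Int) (mem : List (String × String)) : String :=
  let text := fcGet mem "text" (fcGet mem "summary" "")
  let file := if r ≤ 1 then fcGet mem "file_path" "" else ""
  if file ≠ "" then "  • " ++ text ++ " (" ++ file ++ ")" else "  • " ++ text

def fcTake (r : Int) (b : List (List (String × String))) : List (List (String × String)) :=
  match fcLim r with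
  | none => b
  | some l => b.take l.toNat

-- the section block one severity contributes
def fcBlk (r : Int) (b : List (List (String × String))) : List String :=
  if b = [] then []
  else PySem.List.pyGetD fcHeaders r "" :: (fcTake r b).map (fcLine r)

theorem fcOrder_mk : (PySem.Dict.ofList [("high", (0:Int)), ("medium", 1), ("low", 2), ("other", 3)])
    = PySem.Dict.mk [("high", (0:Int)), ("medium", 1), ("low", 2), ("other", 3)] := by
  apply PySem.Dict.ext; decide

theorem fcRank_key (m : List (String × String)) :
    fcRank m = (PySem.Dict.mk [("high", (0:Int)), ("medium", 1), ("low", 2),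
      ("other", 3)]).getD (fcGet m "severity" "other") 3 := by
  unfold fcRank; rw [fcOrder_mk]

theorem fcRank_cases (m : List (String × String)) :
    fcRank m = 0 ∨ fcRank m = 1 ∨ fcRank m = 2 ∨ fcRank m = 3 := by
  rw [fcRank_key]
  unfold PySem.Dict.getD
  rw [PySem.Dict.get?_mk_cons, PySem.Dict.get?_mk_cons, PySem.Dict.get?_mk_cons,
    PySem.Dict.get?_mk_cons]
  split_ifs <;> simp [PySem.Dict.get?]

theorem mem_fcF {memories : List (List (String × String))} {r : Int}
    {m : List (String × String)} (h : m ∈ fcF memories r) : fcRank m = r := by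
  simp [fcF, List.mem_filter] at h
  exact h.2

theorem fcInsertBy_append {α : Type} (before : α → α → Bool) (x : α) (u v : List α)
    (hu : ∀ y ∈ u, before x y = false) :
    PySem.List.insertBy before x (u ++ v) = u ++ PySem.List.insertBy before x v := by
  induction u with
  | nil => simp
  | cons a t ih =>
    simp only [List.cons_append, PySem.List.insertBy, hu a (by simp), Bool.false_eq_true,
      if_false]
    rw [ih (fun y hy => hu y (by simp [hy]))]

theorem fcInsertBy_all {α : Type} (before : α → α → Bool) (x : α) (v : List α)
    (hv : ∀ y ∈ v, before x y = true) :
    PySem.List.insertBy before x v = x :: v := by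
  cases v with
  | nil => simp [PySem.List.insertBy]
  | cons a t => simp [PySem.List.insertBy, hv a (by simp)]

-- stable sort by rank = the rank classes concatenated in rank order
theorem fcSorted_eq (xs : List (List (String × String))) :
    PySem.List.sorted xs fcRank false = fcF xs 0 ++ fcF xs 1 ++ fcF xs 2 ++ fcF xs 3 := by
  rw [PySem.List.sorted_eq_foldl_insertBy]
  induction xs using List.reverseRecOn with
  | nil => simp [fcF]
  | append_singleton t x ih =>
    rw [List.foldl_append, List.foldl_cons, List.foldl_nil, ih]
    have hF : ∀ r : Int, fcF (t ++ [x]) r = fcF t r ++ (if fcRank x == r then [x] else []) := by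
      intro r; simp [fcF, List.filter_append, List.filter_cons]
    rcases fcRank_cases x with hr | hr | hr | hr
    · rw [show fcF t 0 ++ fcF t 1 ++ fcF t 2 ++ fcF t 3
          = fcF t 0 ++ (fcF t 1 ++ fcF t 2 ++ fcF t 3) by simp [List.append_assoc]]
      rw [fcInsertBy_append _ _ _ _ (by
        intro y hy; have := mem_fcF hy; simp [hr, this])]
      rw [fcInsertBy_all _ _ _ (by
        intro y hy
        rcases List.mem_append.1 hy with hy | hy
        · rcases List.mem_append.1 hy with hy | hy <;>
            · have := mem_fcF hy; simp [hr, this]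
        · have := mem_fcF hy; simp [hr, this])]
      simp [hF, hr, List.append_assoc]
    · rw [show fcF t 0 ++ fcF t 1 ++ fcF t 2 ++ fcF t 3
          = (fcF t 0 ++ fcF t 1) ++ (fcF t 2 ++ fcF t 3) by simp [List.append_assoc]]
      rw [fcInsertBy_append _ _ _ _ (by
        intro y hy
        rcases List.mem_append.1 hy with hy | hy <;>
          · have := mem_fcF hy; simp [hr, this])]
      rw [fcInsertBy_all _ _ _ (by
        intro y hy
        rcases List.mem_append.1 hy with hy | hy <;>
          · have := mem_fcF hy; simp [hr, this])]
      simp [hF, hr, List.append_assoc]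
    · rw [show fcF t 0 ++ fcF t 1 ++ fcF t 2 ++ fcF t 3
          = (fcF t 0 ++ fcF t 1 ++ fcF t 2) ++ fcF t 3 by simp [List.append_assoc]]
      rw [fcInsertBy_append _ _ _ _ (by
        intro y hy
        rcases List.mem_append.1 hy with hy | hy
        · rcases List.mem_append.1 hy with hy | hy <;>
            · have := mem_fcF hy; simp [hr, this]
        · have := mem_fcF hy; simp [hr, this])]
      rw [fcInsertBy_all _ _ _ (by
        intro y hy; have := mem_fcF hy; simp [hr, this])]
      simp [hF, hr, List.append_assoc]
    · rw [PySem.List.insertBy_of_forall_not_before _ _ _ (by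
        intro y hy
        simp only [List.mem_append] at hy
        rcases hy with ((hy | hy) | hy) | hy <;>
          · have := mem_fcF hy; simp [hr, this])]
      simp [hF, hr, List.append_assoc]

-- one step inside a run (prev = r): no header
theorem fcStep_same (S : List String) (r c : Int) (m : List (String × String))
    (hm : fcRank m = r) :
    fcStep (S, r, c) m =
      (if (fcLim r).all (fun l => decide (c + 1 ≤ l)) then S ++ [fcLine r m] else S, r, c + 1) := by
  simp only [fcStep, fcLim, fcLine, hm, ne_eq, not_true_eq_false, if_false]
  split_ifs <;> simp_all

theorem fcScan_run (b : List (List (String × String))) (r : Int)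
    (hb : ∀ m ∈ b, fcRank m = r) :
    ∀ (c : Int) (S : List String),
    b.foldl fcStep (S, r, c) =
      (S ++ ((match fcLim r with
              | none => b
              | some l => b.take (l - c).toNat).map (fcLine r)), r, c + b.length) := by
  induction b with
  | nil => intro c S; cases fcLim r <;> simp
  | cons m t ih =>
    intro c S
    rw [List.foldl_cons, fcStep_same S r c m (hb m (by simp))]
    rw [ih (fun y hy => hb y (by simp [hy])) (c + 1)]
    cases hl : fcLim r with
    | none => simp; omega
    | some l =>
      by_cases hcl : c + 1 ≤ l
      · have h1 : (l - c).toNat = (l - (c+1)).toNat + 1 := by omega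
        simp only [Option.all_some, decide_eq_true_eq, if_pos hcl, h1, List.take_succ_cons]
        simp; omega
      · have h1 : (l - c).toNat = 0 := by omega
        have h2 : (l - (c+1)).toNat = 0 := by omega
        simp only [Option.all_some, decide_eq_true_eq, if_neg hcl, h1, h2, List.take_zero]
        simp; omega

-- entering a rank-r block with prev ≠ r: header first, the line of the first element
theorem fcStep_new (S : List String) (r prev c : Int) (m : List (String × String))
    (hm : fcRank m = r) (hne : prev ≠ r) (h1 : ∀ l, fcLim r = some l → 1 ≤ l) :
    fcStep (S, prev, c) m =
      (S ++ [PySem.List.pyGetD fcHeaders r ""] ++ [fcLine r m], r, 1) := by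
  have hne' : r ≠ prev := fun h => hne h.symm
  have hall : (fcLim r).all (fun l => decide ((0:Int) + 1 ≤ l)) = true := by
    cases hl : fcLim r with
    | none => rfl
    | some l => simpa using h1 l hl
  simp only [fcStep, fcLim, fcLine, hm, ne_eq, hne', not_false_eq_true, if_true] at *
  simp only [hall, if_true]
  split_ifs <;> simp_all

theorem fcScan_block (b : List (List (String × String))) (r prev c : Int) (S : List String)
    (hb : ∀ m ∈ b, fcRank m = r) (hne : prev ≠ r)
    (h1 : ∀ l, fcLim r = some l → 1 ≤ l) :
    b.foldl fcStep (S, prev, c) =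
      (S ++ fcBlk r b, (if b = [] then prev else r), (if b = [] then c else (b.length : Int))) := by
  cases b with
  | nil => simp [fcBlk]
  | cons m t =>
    rw [List.foldl_cons, fcStep_new S r prev c m (hb m (by simp)) hne h1]
    rw [fcScan_run t r (fun y hy => hb y (by simp [hy])) 1]
    simp only [fcBlk, fcTake, reduceCtorEq]
    cases hl : fcLim r with
    | none => simp; omega
    | some l =>
      have hl1 : 1 ≤ l := h1 l hl
      have h2 : l.toNat = (l - 1).toNat + 1 := by omega
      simp only [h2, List.take_succ_cons]
      simp; omega

-- A's dict bucket c = the memories whose severity key is c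
def fcPairF (m : List (String × String)) : String × List (String × String) :=
  (fcGet m "severity" "other", m)

theorem fcBucketsA_getD (memories : List (List (String × String))) (c : String)
    (hc : (PySem.Dict.ofList
        [("high", ([] : List (List (String × String)))), ("medium", []), ("low", []),
         ("other", [])]).getD c [] = []) :
    (fcBucketsA memories).getD c [] =
      memories.filter (fun m => fcGet m "severity" "other" == c) := by
  unfold fcBucketsA
  rw [show (fun (d : PySem.Dict String (List (List (String × String)))) mem =>
        d.modify (fcGet mem "severity" "other") [] (fun l => l ++ [mem]))
      = (fun d x => (fun (d : PySem.Dict String (List (List (String × String)))) p =>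
          d.modify p.1 [] (fun l => l ++ [p.2])) d (fcPairF x)) from rfl]
  rw [← List.foldl_map (f := fcPairF)
    (g := fun (d : PySem.Dict String (List (List (String × String)))) p =>
      d.modify p.1 [] (fun l => l ++ [p.2]))]
  rw [PySem.Dict.getD_foldl_modify_append, hc]
  rw [List.filter_map, List.map_map]
  simp [fcPairF, Function.comp_def]

-- per-rank shapes of B's blocks, matching A's literal code
theorem fcLine_zero (m : List (String × String)) : fcLine 0 m = fcLineFileA m := by
  simp [fcLine, fcLineFileA]
theorem fcLine_one (m : List (String × String)) : fcLine 1 m = fcLineFileA m := by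
  simp [fcLine, fcLineFileA]
theorem fcLine_two (m : List (String × String)) : fcLine 2 m = fcLineA m := by
  simp [fcLine, fcLineA]
theorem fcLine_three (m : List (String × String)) : fcLine 3 m = fcLineA m := by
  simp [fcLine, fcLineA]

theorem fcTake_zero (b : List (List (String × String))) : fcTake 0 b = b := rfl
theorem fcTake_one (b : List (List (String × String))) : fcTake 1 b = b := rfl
theorem fcTake_two (b : List (List (String × String))) : fcTake 2 b = b.take 5 := rfl
theorem fcTake_three (b : List (List (String × String))) : fcTake 3 b = b.take 3 := rfl

theorem fcLineF_zero : fcLine 0 = fcLineFileA := funext fcLine_zero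
theorem fcLineF_one : fcLine 1 = fcLineFileA := funext fcLine_one
theorem fcLineF_two : fcLine 2 = fcLineA := funext fcLine_two
theorem fcLineF_three : fcLine 3 = fcLineA := funext fcLine_three

theorem fcHdr_zero : PySem.List.pyGetD fcHeaders 0 "" = "**High Priority Changes:**" := rfl
theorem fcHdr_one : PySem.List.pyGetD fcHeaders 1 "" = "\n**Medium Priority Changes:**" := rfl
theorem fcHdr_two : PySem.List.pyGetD fcHeaders 2 "" = "\n**Low Priority Changes:**" := rfl
theorem fcHdr_three : PySem.List.pyGetD fcHeaders 3 "" = "\n**Other Context:**" := rfl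

theorem fcSlice5 (b : List (List (String × String))) :
    PySem.List.slice b none (some 5) = b.take 5 := by
  simp only [Nat.ofNat_nonneg, PySem.List.slice_to, Int.reduceToNat]
theorem fcSlice3 (b : List (List (String × String))) :
    PySem.List.slice b none (some 3) = b.take 3 := by
  simp only [Nat.ofNat_nonneg, PySem.List.slice_to, Int.reduceToNat]

-- ===== VERDICT (by name: the statement is the Claim_ definition above) =====
theorem format_categorized_spec : Claim_equal_format_categorized := by
  intro memories _ hpre
  unfold Spec_format_categorized
  by_cases hmem : memories = []
  · simp [format_categorized, format_categorized_alt, hmem]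
  · -- A's buckets are the rank classes
    have hflt : ∀ (s : String) (r : Int),
        (∀ m ∈ memories, (fcGet m "severity" "other" == s) = (fcRank m == r)) →
        memories.filter (fun m => fcGet m "severity" "other" == s) = fcF memories r :=
      fun _ _ h => List.filter_congr h
    have hcase : ∀ m ∈ memories, ∀ (P : Prop),
        (fcGet m "severity" "other" = "high" → P) →
        (fcGet m "severity" "other" = "medium" → P) →
        (fcGet m "severity" "other" = "low" → P) →
        (fcGet m "severity" "other" = "other" → P) → P := by
      intro m hm P p0 p1 p2 p3
      have hk := hpre m hm
      simp only [List.mem_cons, List.not_mem_nil, or_false] at hk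
      rcases hk with hk | hk | hk | hk
      exacts [p0 hk, p1 hk, p2 hk, p3 hk]
    have h0 : memories.filter (fun m => fcGet m "severity" "other" == "high")
        = fcF memories 0 := by
      apply hflt; intro m hm
      exact hcase m hm _ (fun hk => by rw [fcRank_key, hk]; rfl)
        (fun hk => by rw [fcRank_key, hk]; rfl) (fun hk => by rw [fcRank_key, hk]; rfl)
        (fun hk => by rw [fcRank_key, hk]; rfl)
    have h1 : memories.filter (fun m => fcGet m "severity" "other" == "medium")
        = fcF memories 1 := by
      apply hflt; intro m hm
      exact hcase m hm _ (fun hk => by rw [fcRank_key, hk]; rfl)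
        (fun hk => by rw [fcRank_key, hk]; rfl) (fun hk => by rw [fcRank_key, hk]; rfl)
        (fun hk => by rw [fcRank_key, hk]; rfl)
    have h2 : memories.filter (fun m => fcGet m "severity" "other" == "low")
        = fcF memories 2 := by
      apply hflt; intro m hm
      exact hcase m hm _ (fun hk => by rw [fcRank_key, hk]; rfl)
        (fun hk => by rw [fcRank_key, hk]; rfl) (fun hk => by rw [fcRank_key, hk]; rfl)
        (fun hk => by rw [fcRank_key, hk]; rfl)
    have h3 : memories.filter (fun m => fcGet m "severity" "other" == "other")
        = fcF memories 3 := by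
      apply hflt; intro m hm
      exact hcase m hm _ (fun hk => by rw [fcRank_key, hk]; rfl)
        (fun hk => by rw [fcRank_key, hk]; rfl) (fun hk => by rw [fcRank_key, hk]; rfl)
        (fun hk => by rw [fcRank_key, hk]; rfl)
    simp only [format_categorized, format_categorized_alt, if_neg hmem]
    rw [fcSorted_eq]
    rw [List.foldl_append, List.foldl_append, List.foldl_append]
    rw [fcScan_block (fcF memories 0) 0 (-1) 0 [] (fun y hy => mem_fcF hy)
      (by decide) (fun l hl => nomatch hl)]
    rw [fcScan_block (fcF memories 1) 1 _ _ _ (fun y hy => mem_fcF hy)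
      (by split_ifs <;> decide) (fun l hl => nomatch hl)]
    rw [fcScan_block (fcF memories 2) 2 _ _ _ (fun y hy => mem_fcF hy)
      (by split_ifs <;> decide)
      (by intro l hl; rw [show fcLim 2 = some 5 from rfl] at hl; injection hl with h; omega)]
    rw [fcScan_block (fcF memories 3) 3 _ _ _ (fun y hy => mem_fcF hy)
      (by split_ifs <;> decide)
      (by intro l hl; rw [show fcLim 3 = some 3 from rfl] at hl; injection hl with h; omega)]
    rw [fcBucketsA_getD memories "high" rfl, fcBucketsA_getD memories "medium" rfl,
        fcBucketsA_getD memories "low" rfl, fcBucketsA_getD memories "other" rfl]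
    rw [h0, h1, h2, h3]
    simp only [PySem.List.foldl_append_singleton_eq_map, fcSlice5, fcSlice3]
    by_cases hF0 : fcF memories 0 = [] <;> by_cases hF1 : fcF memories 1 = [] <;>
      by_cases hF2 : fcF memories 2 = [] <;> by_cases hF3 : fcF memories 3 = []
    · exfalso
      apply hmem
      have hs : PySem.List.sorted memories fcRank false = [] := by
        rw [fcSorted_eq, hF0, hF1, hF2, hF3]; rfl
      exact (PySem.List.sorted_eq_nil_iff memories fcRank false).1 hs
    all_goals
      simp [fcBlk, hF0, hF1, hF2, hF3, fcTake_zero, fcTake_one, fcTake_two, fcTake_three,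
        fcLineF_zero, fcLineF_one, fcLineF_two, fcLineF_three, fcHdr_zero, fcHdr_one,
        fcHdr_two, fcHdr_three, List.append_assoc]
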